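-- pv_equiv track=rewrite | github.com/rsmith1220/Cifrados25 | E-Criptografia/parte2.py | base64_a_binario
-- ===== SOURCE A (Python) =====
-- base64_chars = "ABCDEFGHIJKLMNOPQRSTUVWXYZabcdefghijklmnopqrstuvwxyz0123456789+/"
--
-- def base64_a_binario(base64_string):
--     # Crear un diccionario de decodificación para Base64
--
--     base64_dict = {char: index for index, char in enumerate(base64_chars)}
--
--     # Eliminar caracteres de relleno '=' y preparar los bits
--     base64_string = base64_string.rstrip('=')
--     bits = ""
--     for char in base64_string:
--         if char not in base64_dict:
--             raise ValueError("Cadena Base64 inválida")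
--         # Obtener el índice del carácter y convertirlo a binario de 6 bits
--         bits += f"{base64_dict[char]:06b}"
--
--     return bits
-- ===== SOURCE B (Python) =====
-- base64_chars = "ABCDEFGHIJKLMNOPQRSTUVWXYZabcdefghijklmnopqrstuvwxyz0123456789+/"
--
-- def base64_a_binario(base64_string):
--     # Accumulate one big integer (value times 64 plus index per char) and
--     # render all the bits in a single final conversion.
--     base64_string = base64_string.rstrip('=')
--     n = len(base64_string)
--     if n == 0:
--         return ""
--     value = 0
--     for char in base64_string:
--         index = base64_chars.find(char)
--         if index < 0:
--             raise ValueError("Cadena Base64 inválida")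
--         value = value * 64 + index
--     return format(value, f"0{6 * n}b")
-- ===== Notes on version B (the rewrite author's own statement) =====
-- stated objective: alternative
-- what changed: Instead of concatenating a 6-bit string per character, B folds the characters into one big integer (value times 64 plus the alphabet index, found with str.find instead of a dict) and renders the whole bit string at once with a single zero-padded binary format of width 6n.
import Mathlib
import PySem

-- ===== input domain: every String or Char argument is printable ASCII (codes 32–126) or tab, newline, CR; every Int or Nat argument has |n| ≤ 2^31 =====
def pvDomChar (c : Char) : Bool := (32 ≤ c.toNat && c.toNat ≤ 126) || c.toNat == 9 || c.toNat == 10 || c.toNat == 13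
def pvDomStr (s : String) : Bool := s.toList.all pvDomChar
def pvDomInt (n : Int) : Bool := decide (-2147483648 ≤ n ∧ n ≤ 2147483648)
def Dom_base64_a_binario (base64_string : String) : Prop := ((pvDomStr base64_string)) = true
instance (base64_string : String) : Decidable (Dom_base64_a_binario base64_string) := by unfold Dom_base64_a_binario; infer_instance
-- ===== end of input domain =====

-- B folds the characters into one big integer and renders all bits with a single
-- final zero-padded conversion, instead of A's per-character 6-bit concatenation.

-- ===== PORT A =====
def pvB64 : List Char := "ABCDEFGHIJKLMNOPQRSTUVWXYZabcdefghijklmnopqrstuvwxyz0123456789+/".toList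

-- {char: index for index, char in enumerate(base64_chars)}
def pvDictA : PySem.Dict Char Int :=
  (PySem.List.enumerate pvB64 0).foldl (fun d p => d.insert p.2 p.1) PySem.Dict.empty

-- hand port of rstrip with the padding character: drop trailing padding chars (exact; used by both Pythons)
def pvRstripEq (s : String) : List Char := (s.toList.reverse.dropWhile (· == '=')).reverse

-- the for-loop of A: append the 6-bit zero-padded binary of the index; none = the ValueError branch
def pvLoopA : List Char → List Char → Option (List Char)
  | acc, [] => some acc
  | acc, c :: rest =>
    match pvDictA.get? c with
    | none => none
    | some i => pvLoopA (acc ++ PySem.Chars.zfill (PySem.Int.toBinChars i) 6) rest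

def base64_a_binario (base64_string : String) : String :=
  match pvLoopA [] (pvRstripEq base64_string) with
  | some bits => String.mk bits
  | none => ""  -- Python raises ValueError here; excluded by Pre_

-- ===== PORT B =====
-- the for-loop of B: value = value * 64 + index; none = the ValueError branch
def pvLoopB : List Char → Int → Option Int
  | [], v => some v
  | c :: rest, v =>
    let i := PySem.Chars.find pvB64 [c]
    if i < 0 then none
    else pvLoopB rest (v * 64 + i)

def base64_a_binario_alt (base64_string : String) : String :=
  let t := pvRstripEq base64_string
  if t.length = 0 then ""
  else
    match pvLoopB t 0 with
    | some v => String.mk (PySem.Chars.zfill (PySem.Int.toBinChars v) ((6 : Int) * t.length))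
    | none => ""  -- Python raises ValueError here; excluded by Pre_

-- ===== PRECONDITION & SPEC =====
-- Pre_ excludes exactly the inputs where both Pythons raise ValueError:
-- some character of the padding-right-stripped string is not in the base64 alphabet.
def Pre_base64_a_binario (base64_string : String) : Prop :=
  ((pvRstripEq base64_string).all (fun c => pvB64.contains c)) = true
instance (base64_string : String) : Decidable (Pre_base64_a_binario base64_string) := by
  unfold Pre_base64_a_binario; infer_instance

def pvWitness_base64_a_binario : String := "TWFu"

def Spec_base64_a_binario (base64_string : String) (out : String) : Prop := out = base64_a_binario_alt base64_string
instance (base64_string : String) (out : String) : Decidable (Spec_base64_a_binario base64_string out) := by unfold Spec_base64_a_binario; infer_instance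

-- ===== CLAIM (what is proved, stated in full; the proofs are below) =====
def Claim_equal_base64_a_binario : Prop := ∀ (base64_string : String), Dom_base64_a_binario base64_string → Pre_base64_a_binario base64_string → Spec_base64_a_binario base64_string (base64_a_binario base64_string)

-- ===== LEMMAS AND PROOFS =====

-- most-significant-first binary digits (= Nat.toDigits 2, proved in pv_toBin_nat)
def pvToDig (v : Nat) : List Char :=
  if v < 2 then [Nat.digitChar v]
  else pvToDig (v / 2) ++ [Nat.digitChar (v % 2)]
decreasing_by exact Nat.div_lt_self (by omega) (by omega)

-- the low m binary digits of v, zero-padded to width exactly m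
def pvPad : Nat → Nat → List Char
  | 0, _ => []
  | m+1, v => pvPad m (v / 2) ++ [Nat.digitChar (v % 2)]

lemma pv_toDig_lt {v : Nat} (h : v < 2) : pvToDig v = [Nat.digitChar v] := by
  rw [pvToDig]; simp [h]

lemma pv_toDig_ge {v : Nat} (h : ¬ v < 2) :
    pvToDig v = pvToDig (v / 2) ++ [Nat.digitChar (v % 2)] := by
  rw [pvToDig]; simp [h]

lemma pv_toDig_ne_nil (v : Nat) : pvToDig v ≠ [] := by
  rw [pvToDig]; split <;> simp

lemma pv_core_acc : ∀ (f n : Nat) (acc : List Char),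
    Nat.toDigitsCore 2 f n acc = Nat.toDigitsCore 2 f n [] ++ acc := by
  intro f
  induction f with
  | zero => intro n acc; simp [Nat.toDigitsCore]
  | succ f ih =>
    intro n acc
    simp only [Nat.toDigitsCore]
    by_cases h : n / 2 = 0
    · simp [h]
    · simp only [h, if_false]
      rw [ih (n / 2) [Nat.digitChar (n % 2)], ih (n / 2) (Nat.digitChar (n % 2) :: acc)]
      simp

lemma pv_core_eq_toDig : ∀ (n f : Nat), n < f → Nat.toDigitsCore 2 f n [] = pvToDig n := by
  intro n
  induction n using Nat.strong_induction_on with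
  | _ n ih =>
    intro f hf
    match f with
    | f + 1 =>
      simp only [Nat.toDigitsCore]
      by_cases h : n / 2 = 0
      · have hn : n < 2 := by omega
        rw [pv_toDig_lt hn]
        simp [h, Nat.mod_eq_of_lt hn]
      · have hn : ¬ n < 2 := by omega
        simp only [h, if_false]
        rw [pv_core_acc, ih (n / 2) (by omega) f (by omega), pv_toDig_ge hn]

lemma pv_toBin_nat (v : Nat) : PySem.Int.toBinChars (v : Int) = pvToDig v := by
  unfold PySem.Int.toBinChars
  rw [if_neg (by omega)]
  simp only [Int.toNat_natCast]
  exact pv_core_eq_toDig v (v + 1) (by omega)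

lemma pv_toDig_len : ∀ (v m : Nat), v < 2^m → 1 ≤ m → (pvToDig v).length ≤ m := by
  intro v
  induction v using Nat.strong_induction_on with
  | _ v ih =>
    intro m hv hm
    by_cases h : v < 2
    · rw [pv_toDig_lt h]; simpa using hm
    · have hm2 : 2 ≤ m := by
        by_contra hc
        have : m = 1 := by omega
        subst this; simp at hv; omega
      rw [pv_toDig_ge h]
      have h2 : 2 ^ m = 2 * 2 ^ (m - 1) := by
        rw [← pow_succ']; congr 1; omega
      have : v / 2 < 2 ^ (m - 1) := by omega
      have := ih (v / 2) (by omega) (m - 1) this (by omega)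
      simp only [List.length_append, List.length_cons, List.length_nil]
      omega

lemma pv_toDig_mem : ∀ (v : Nat), ∀ c ∈ pvToDig v, c = '0' ∨ c = '1' := by
  intro v
  induction v using Nat.strong_induction_on with
  | _ v ih =>
    intro c hc
    by_cases h : v < 2
    · rw [pv_toDig_lt h] at hc
      interval_cases v <;> simp_all <;> simp [hc, Nat.digitChar]
    · rw [pv_toDig_ge h] at hc
      rcases List.mem_append.mp hc with h1 | h1
      · exact ih (v / 2) (Nat.div_lt_self (by omega) (by omega)) c h1
      · have : c = Nat.digitChar (v % 2) := by simpa using h1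
        subst this
        have : v % 2 = 0 ∨ v % 2 = 1 := by omega
        rcases this with h2 | h2 <;> rw [h2] <;> simp [Nat.digitChar]

lemma pv_pad_eq_rep : ∀ (m v : Nat), v < 2^m → 1 ≤ m →
    pvPad m v = List.replicate (m - (pvToDig v).length) '0' ++ pvToDig v := by
  intro m
  induction m with
  | zero => omega
  | succ m ih =>
    intro v hv _
    by_cases hm : m = 0
    · subst hm
      have h2 : v < 2 := by simpa using hv
      rw [pv_toDig_lt h2]
      show pvPad 0 (v / 2) ++ [Nat.digitChar (v % 2)] = _
      simp [pvPad, Nat.mod_eq_of_lt h2]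
    · have hm1 : 1 ≤ m := by omega
      have hdiv : v / 2 < 2 ^ m := by
        have h2 : 2 ^ (m + 1) = 2 * 2 ^ m := by rw [← pow_succ']
        omega
      show pvPad m (v / 2) ++ [Nat.digitChar (v % 2)] = _
      rw [ih (v / 2) hdiv hm1]
      by_cases h : v < 2
      · have hv2 : v / 2 = 0 := by omega
        rw [hv2, pv_toDig_lt (by omega : (0:Nat) < 2), pv_toDig_lt h]
        rw [Nat.mod_eq_of_lt h]
        have h0 : Nat.digitChar 0 = '0' := by decide
        rw [h0]
        simp only [List.length_cons, List.length_nil]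
        rw [show m + 1 - (0 + 1) = (m - 1) + 1 by omega, List.replicate_succ']
      · rw [pv_toDig_ge h]
        have hlen := pv_toDig_len (v / 2) m hdiv hm1
        simp only [List.length_append, List.length_cons, List.length_nil]
        have : m + 1 - ((pvToDig (v / 2)).length + 1) = m - (pvToDig (v / 2)).length := by omega
        rw [this, List.append_assoc]

lemma pv_zfill_pad (m v : Nat) (hv : v < 2^m) (hm : 1 ≤ m) :
    PySem.Chars.zfill (pvToDig v) (m : Int) = pvPad m v := by
  have hlen := pv_toDig_len v m hv hm
  obtain ⟨c, rest, hcr⟩ : ∃ c rest, pvToDig v = c :: rest := by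
    cases h : pvToDig v with
    | nil => exact absurd h (pv_toDig_ne_nil v)
    | cons c rest => exact ⟨c, rest, rfl⟩
  have hc01 : c = '0' ∨ c = '1' := pv_toDig_mem v c (by rw [hcr]; simp)
  have hcns : ¬ (c = '+' ∨ c = '-') := by rcases hc01 with h | h <;> subst h <;> simp
  unfold PySem.Chars.zfill
  by_cases hle : (m : Int) ≤ (pvToDig v).length
  · rw [if_pos hle]
    have : (pvToDig v).length = m := by omega
    rw [pv_pad_eq_rep m v hv hm, this]
    simp
  · rw [if_neg hle, hcr]
    simp only [hcns, if_false]
    rw [← hcr, pv_pad_eq_rep m v hv hm]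
    simp

lemma pv_pad_concat : ∀ (m k a b : Nat), b < 2^m →
    pvPad (k + m) (a * 2^m + b) = pvPad k a ++ pvPad m b := by
  intro m
  induction m with
  | zero =>
    intro k a b hb
    have : b = 0 := by simpa using hb
    subst this
    simp [pvPad]
  | succ m ih =>
    intro k a b hb
    have h2 : 2 ^ (m + 1) = 2 * 2 ^ m := by rw [← pow_succ']
    have hkm : k + (m + 1) = (k + m) + 1 := by omega
    rw [hkm]
    show pvPad (k + m) ((a * 2^(m+1) + b) / 2) ++ [Nat.digitChar ((a * 2^(m+1) + b) % 2)] = _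
    have hp : a * 2^(m+1) = 2 * (a * 2^m) := by rw [pow_succ]; ring
    have hq : (2:Nat)^(m+1) = 2 * 2^m := by rw [pow_succ]; ring
    have hdiv : (a * 2^(m+1) + b) / 2 = a * 2^m + b / 2 := by
      rw [hp]; omega
    have hmod : (a * 2^(m+1) + b) % 2 = b % 2 := by
      rw [hp]; omega
    rw [hdiv, hmod, ih (k) a (b / 2) (by omega)]
    show _ = pvPad k a ++ (pvPad m (b / 2) ++ [Nat.digitChar (b % 2)])
    rw [List.append_assoc]

lemma pv_nodup64 : pvB64.Nodup := by decide

lemma pv_len64 : pvB64.length = 64 := by decide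

lemma pv_dict_get (c : Char) (hc : c ∈ pvB64) :
    pvDictA.get? c = some ((pvB64.idxOf c : Nat) : Int) := by
  have hitems : pvDictA.items =
      PySem.Dict.empty.items ++ (PySem.List.enumerate pvB64 0).map (fun p => (p.2, p.1)) := by
    exact PySem.Dict.items_foldl_insert_fresh (PySem.List.enumerate pvB64 0)
      (fun p => p.2) (fun p => p.1) PySem.Dict.empty
      (by intro a _; simp [PySem.Dict.contains_empty])
      (by rw [PySem.List.map_snd_enumerate]; exact pv_nodup64)
  have hkeysnd : pvDictA.keys.Nodup := by
    have : pvDictA.keys = pvDictA.items.map (fun p => p.1) := rfl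
    rw [this, hitems]
    simp only [List.map_append, List.map_map]
    have hmap : ((PySem.List.enumerate pvB64 0).map
        ((fun p : Char × Int => p.1) ∘ (fun p : Int × Char => (p.2, p.1)))) = pvB64 :=
      PySem.List.map_snd_enumerate pvB64 0
    rw [hmap]
    simpa using pv_nodup64
  have hlt : pvB64.idxOf c < pvB64.length := List.idxOf_lt_length_of_mem hc
  have hmem : (c, ((pvB64.idxOf c : Nat) : Int)) ∈ pvDictA.items := by
    rw [hitems]
    apply List.mem_append_right
    apply List.mem_map.mpr
    refine ⟨(((pvB64.idxOf c : Int)), c), ?_, rfl⟩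
    rw [PySem.List.mem_enumerate_iff]
    exact ⟨pvB64.idxOf c, hlt, by simp [List.getElem_idxOf]⟩
  exact PySem.Dict.get?_of_mem_items pvDictA hmem hkeysnd

lemma pv_find_idx (c : Char) (hc : c ∈ pvB64) :
    PySem.Chars.find pvB64 [c] = ((pvB64.idxOf c : Nat) : Int) := by
  have hinf : [c] <:+: pvB64 := by
    obtain ⟨s, t, hst⟩ := List.append_of_mem hc
    exact ⟨s, t, by rw [hst]; simp⟩
  have hne : PySem.Chars.find pvB64 [c] ≠ -1 := (PySem.Chars.find_ne_neg_one_iff _ _).mpr hinf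
  have hge : 0 ≤ PySem.Chars.find pvB64 [c] := (PySem.Chars.find_nonneg_iff _ _).mpr hinf
  have hspec := PySem.Chars.findFrom_natCast_spec pvB64 [c] 0 (by omega)
    (by simp only [Nat.cast_zero]; rw [PySem.Chars.findFrom_zero]; exact hne)
  simp only [Nat.cast_zero] at hspec
  rw [PySem.Chars.findFrom_zero] at hspec
  obtain ⟨-, hpre, hmin⟩ := hspec
  set f := (PySem.Chars.find pvB64 [c]).toNat with hfdef
  -- the found position holds c
  have hfc : pvB64[f]? = some c := by
    obtain ⟨l', hl'⟩ := List.cons_prefix_iff.mp hpre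
    have : (pvB64.drop f)[0]? = some c := by rw [hl'.1]; simp
    rwa [List.getElem?_drop, Nat.add_zero] at this
  have hflt : f < pvB64.length := by
    by_contra hcon
    rw [List.getElem?_eq_none (by omega)] at hfc
    simp at hfc
  -- f is minimal, hence equals idxOf
  have hidxle : pvB64.idxOf c ≤ f := by
    by_contra hcon
    have hcon : f < List.idxOf c pvB64 := by omega
    have h1 : pvB64[f] = c := by
      rw [List.getElem?_eq_getElem hflt] at hfc
      exact Option.some.inj hfc
    have h2 := List.not_of_lt_findIdx (p := fun x => x == c) (xs := pvB64)
      (by simpa [List.idxOf] using hcon)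
    simp at h2
    exact h2 h1
  have hlt : pvB64.idxOf c < pvB64.length := List.idxOf_lt_length_of_mem hc
  have hle : f ≤ pvB64.idxOf c := by
    by_contra hcon
    apply hmin (pvB64.idxOf c) (by omega) (by omega)
    have : pvB64.drop (pvB64.idxOf c) ≠ [] := by
      simp [List.drop_eq_nil_iff]; omega
    obtain ⟨d, l', hdl⟩ := List.exists_cons_of_ne_nil this
    have hd : d = c := by
      have : (pvB64.drop (pvB64.idxOf c))[0]? = some d := by rw [hdl]; simp
      rw [List.getElem?_drop, Nat.add_zero, List.getElem?_eq_getElem hlt] at this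
      have := Option.some.inj this
      rw [← this, List.getElem_idxOf hlt]
    rw [hdl, hd]
    exact ⟨l', rfl⟩
  have : f = pvB64.idxOf c := by omega
  rw [hfdef] at this
  omega

lemma pv_idx_lt (c : Char) (hc : c ∈ pvB64) : pvB64.idxOf c < 64 := by
  have := List.idxOf_lt_length_of_mem hc
  rwa [pv_len64] at this

set_option maxRecDepth 10000 in
lemma pv_loopA_char : ∀ (rest acc : List Char), (∀ c ∈ rest, c ∈ pvB64) →
    pvLoopA acc rest = some (acc ++ rest.flatMap (fun c => pvPad 6 (pvB64.idxOf c))) := by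
  intro rest
  induction rest with
  | nil => intro acc _; rw [List.flatMap_nil, List.append_nil]; rfl
  | cons c rest ih =>
    intro acc h
    have hc : c ∈ pvB64 := h c (by simp)
    show (match pvDictA.get? c with
      | none => none
      | some i => pvLoopA (acc ++ PySem.Chars.zfill (PySem.Int.toBinChars i) 6) rest) = _
    rw [pv_dict_get c hc]
    simp only
    rw [pv_toBin_nat, show ((6:Int)) = ((6:Nat) : Int) by norm_num,
      pv_zfill_pad 6 (pvB64.idxOf c) (by have := pv_idx_lt c hc; norm_num; omega) (by omega)]
    rw [ih (acc ++ pvPad 6 (pvB64.idxOf c)) (fun d hd => h d (by simp [hd]))]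
    simp

set_option maxRecDepth 10000 in
lemma pv_loopB_char : ∀ (rest : List Char) (v : Nat), (∀ c ∈ rest, c ∈ pvB64) →
    pvLoopB rest (v : Int) =
      some ((rest.foldl (fun a c => a * 64 + pvB64.idxOf c) v : Nat) : Int) := by
  intro rest
  induction rest with
  | nil => intro v _; simp [pvLoopB]
  | cons c rest ih =>
    intro v h
    have hc : c ∈ pvB64 := h c (by simp)
    show (let i := PySem.Chars.find pvB64 [c];
      if i < 0 then none else pvLoopB rest ((v : Int) * 64 + i)) = _
    rw [show (let i := PySem.Chars.find pvB64 [c];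
        if i < 0 then none else pvLoopB rest ((v : Int) * 64 + i)) =
        if PySem.Chars.find pvB64 [c] < 0 then none
        else pvLoopB rest ((v : Int) * 64 + PySem.Chars.find pvB64 [c]) from rfl]
    rw [pv_find_idx c hc]
    rw [if_neg (by omega)]
    have hcast : (v : Int) * 64 + ((pvB64.idxOf c : Nat) : Int) =
        ((v * 64 + pvB64.idxOf c : Nat) : Int) := by push_cast; ring
    rw [hcast, ih (v * 64 + pvB64.idxOf c) (fun d hd => h d (by simp [hd]))]
    rfl

lemma pv_fold_lt : ∀ (rest : List Char) (v k : Nat), (∀ c ∈ rest, c ∈ pvB64) → v < 2^k →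
    rest.foldl (fun a c => a * 64 + pvB64.idxOf c) v < 2^(k + 6 * rest.length) := by
  intro rest
  induction rest with
  | nil => intro v k _ hv; simpa using hv
  | cons c rest ih =>
    intro v k h hv
    have hc := pv_idx_lt c (h c (by simp))
    have h64 : 2 ^ (k + 6) = 2 ^ k * 64 := by rw [pow_add]; norm_num
    have hstep : v * 64 + pvB64.idxOf c < 2 ^ (k + 6) := by
      rw [h64]; nlinarith
    have := ih (v * 64 + pvB64.idxOf c) (k + 6) (fun d hd => h d (by simp [hd])) hstep
    simp only [List.foldl_cons, List.length_cons]
    have heq : k + 6 + 6 * rest.length = k + 6 * (rest.length + 1) := by omega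
    rwa [heq] at this

lemma pv_concat_pad : ∀ (rest : List Char) (k v : Nat), (∀ c ∈ rest, c ∈ pvB64) → v < 2^k →
    pvPad k v ++ rest.flatMap (fun c => pvPad 6 (pvB64.idxOf c)) =
      pvPad (k + 6 * rest.length) (rest.foldl (fun a c => a * 64 + pvB64.idxOf c) v) := by
  intro rest
  induction rest with
  | nil => intro k v _ _; simp
  | cons c rest ih =>
    intro k v h hv
    have hc := pv_idx_lt c (h c (by simp))
    have h64 : 2 ^ (k + 6) = 2 ^ k * 64 := by rw [pow_add]; norm_num
    have hstep : v * 64 + pvB64.idxOf c < 2 ^ (k + 6) := by rw [h64]; nlinarith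
    simp only [List.flatMap_cons, List.foldl_cons, List.length_cons]
    rw [← List.append_assoc]
    have h6 : (2:Nat)^6 = 64 := by norm_num
    have hcat : pvPad k v ++ pvPad 6 (pvB64.idxOf c) = pvPad (k + 6) (v * 64 + pvB64.idxOf c) := by
      have hpc := pv_pad_concat 6 k v (pvB64.idxOf c) (by rw [h6]; exact hc)
      rw [h6] at hpc
      exact hpc.symm
    rw [hcat, ih (k + 6) (v * 64 + pvB64.idxOf c) (fun d hd => h d (by simp [hd])) hstep]
    rw [show k + 6 + 6 * rest.length = k + 6 * (rest.length + 1) from by omega]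

-- ===== VERDICT (by name: the statement is the Claim_ definition above) =====
set_option maxRecDepth 10000 in
theorem base64_a_binario_spec : Claim_equal_base64_a_binario := by
  intro s _hdom hpre
  unfold Spec_base64_a_binario base64_a_binario base64_a_binario_alt
  unfold Pre_base64_a_binario at hpre
  rw [List.all_eq_true] at hpre
  replace hpre : ∀ c ∈ pvRstripEq s, c ∈ pvB64 := fun c hc => by simpa using hpre c hc
  by_cases hnil : pvRstripEq s = []
  · rw [hnil]
    rfl
  · have hlen : pvRstripEq s ≠ [] := hnil
    have hlen0 : pvRstripEq s ≠ [] → (pvRstripEq s).length ≠ 0 := by simp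
    rw [pv_loopA_char (pvRstripEq s) [] hpre]
    simp only [if_neg (hlen0 hlen)]
    rw [show (0 : Int) = ((0 : Nat) : Int) by norm_num,
      pv_loopB_char (pvRstripEq s) 0 hpre]
    simp only
    have hone : 1 ≤ 6 * (pvRstripEq s).length := by
      have : (pvRstripEq s).length ≠ 0 := hlen0 hlen
      omega
    have hV := pv_fold_lt (pvRstripEq s) 0 0 hpre (by norm_num)
    simp only [Nat.zero_add] at hV
    rw [pv_toBin_nat,
      show (6 : Int) * ((pvRstripEq s).length : Int) = ((6 * (pvRstripEq s).length : Nat) : Int) by push_cast; ring,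
      pv_zfill_pad (6 * (pvRstripEq s).length) _ hV hone]
    have := pv_concat_pad (pvRstripEq s) 0 0 hpre (by norm_num)
    simp only [Nat.zero_add] at this
    rw [show pvPad 0 0 = [] from rfl, List.nil_append] at this
    simp only [List.nil_append]
    rw [this]
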